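-- pv_equiv track=rewrite | github.com/006702-0037/FCode | bitutils.py | num_lookup_bit
-- ===== SOURCE A (Python) =====
-- from itertools import product
--
-- def num_lookup_bit(lookup):
--   if lookup == -1:
--     return ''
--
--   bits=[]
--   current_len=1
--   while len(bits)-1<lookup:
--     bits.extend(["".join(perm[::-1]) for perm in product(["0","1"],repeat=current_len)])
--     current_len+=1
--   return bits[lookup]
-- ===== SOURCE B (Python) =====
-- def num_lookup_bit(lookup):
--     if lookup == -1:
--         return ''
--     n = lookup + 2
--     L = n.bit_length() - 1
--     off = n - (1 << L)
--     return ''.join('1' if (off >> i) & 1 else '0' for i in range(L))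
-- ===== Notes on version B (the rewrite author's own statement) =====
-- stated objective: faster
-- what changed: Instead of materialising every binary string of each successive length until index lookup is reached, B computes the containing length-block from bit_length(lookup+2) and converts the offset directly to its reversed (LSB-first) binary digits.
import Mathlib
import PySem

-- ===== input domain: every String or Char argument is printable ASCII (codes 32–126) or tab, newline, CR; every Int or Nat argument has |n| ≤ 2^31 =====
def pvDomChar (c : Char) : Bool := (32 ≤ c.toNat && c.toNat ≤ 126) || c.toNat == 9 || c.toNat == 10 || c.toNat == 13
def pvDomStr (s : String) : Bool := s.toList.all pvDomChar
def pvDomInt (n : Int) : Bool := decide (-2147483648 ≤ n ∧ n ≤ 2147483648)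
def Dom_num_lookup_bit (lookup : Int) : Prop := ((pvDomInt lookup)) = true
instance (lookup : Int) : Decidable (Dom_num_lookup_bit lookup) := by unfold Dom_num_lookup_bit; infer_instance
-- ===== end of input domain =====

-- B replaces A's block-by-block enumeration of all shorter strings with a direct
-- computation of the containing length-block and the offset's reversed binary digits (measured faster).

-- ===== PORT A =====
-- product(["0","1"], repeat=n) in itertools order (leftmost position varies slowest)
def prod01 : Nat → List (List Char)
  | 0 => [[]]
  | n+1 => (prod01 n).map (fun p => '0' :: p) ++ (prod01 n).map (fun p => '1' :: p)

lemma prod01_length (n : Nat) : (prod01 n).length = 2 ^ n := by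
  induction n with
  | zero => rfl
  | succ n ih => simp [prod01, ih]; ring

-- ["".join(perm[::-1]) for perm in product(["0","1"], repeat=n)]
def blockA (n : Nat) : List String := (prod01 n).map (fun p => String.mk p.reverse)

-- the while loop of A: while len(bits)-1 < lookup: bits.extend(block); current_len += 1
def aLoop (lookup : Int) (bits : List String) (c : Nat) : List String :=
  if (bits.length : Int) - 1 < lookup then
    aLoop lookup (bits ++ blockA c) (c + 1)
  else bits
termination_by (lookup + 1 - bits.length).toNat
decreasing_by
  simp only [List.length_append, blockA, List.length_map, prod01_length]
  have h2 : 1 ≤ 2 ^ c := Nat.one_le_two_pow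
  omega

-- final 'return bits[lookup]': Python raises IndexError exactly where pyGet? is none
-- (excluded by Pre_); the .getD "" default is never reached inside Pre_.
def num_lookup_bit (lookup : Int) : String :=
  if lookup = -1 then "" else
    (PySem.List.pyGet? (aLoop lookup [] 1) lookup).getD ""

-- ===== PORT B =====
-- faithful port of Source B: n.bit_length() is PySem.Int.bitLength, 1 << L is 2^L,
-- ''.join over range(L) is String.mk of the mapped List.range
def num_lookup_bit_alt (lookup : Int) : String :=
  if lookup = -1 then "" else
    let n : Int := lookup + 2
    let L : Nat := PySem.Int.bitLength n - 1
    let off : Int := n - 2 ^ L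
    String.mk ((List.range L).map (fun (i : Nat) =>
      if PySem.Int.band (off >>> (i : Int)) 1 = 1 then '1' else '0'))

-- ===== PRECONDITION & SPEC =====
-- A raises IndexError for every lookup below the sentinel value (the loop never runs and
-- the bits list stays empty); Pre_ admits exactly the inputs on which A returns.
def Pre_num_lookup_bit (lookup : Int) : Prop := -1 ≤ lookup
instance (lookup : Int) : Decidable (Pre_num_lookup_bit lookup) := by
  unfold Pre_num_lookup_bit; infer_instance

def pvWitness_num_lookup_bit : Int := (5)

def Spec_num_lookup_bit (lookup : Int) (out : String) : Prop := out = num_lookup_bit_alt lookup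
instance (lookup : Int) (out : String) : Decidable (Spec_num_lookup_bit lookup out) := by
  unfold Spec_num_lookup_bit; infer_instance

-- ===== CLAIM (what is proved, stated in full; the proofs are below) =====
def Claim_equal_num_lookup_bit : Prop := ∀ (lookup : Int), Dom_num_lookup_bit lookup → Pre_num_lookup_bit lookup → Spec_num_lookup_bit lookup (num_lookup_bit lookup)

-- ===== LEMMAS AND PROOFS =====

-- concatenation of the blocks for lengths 1..c (the bits list after c loop passes)
def bitsUpTo : Nat → List String
  | 0 => []
  | c+1 => bitsUpTo c ++ blockA (c + 1)

-- LSB-first binary digits of r, width n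
def lsb (r n : Nat) : List Char :=
  (List.range n).map (fun i => if (r >>> i) % 2 = 1 then '1' else '0')

-- length block of index j
def Lf (j : Nat) : Nat := PySem.Int.bitLength ((j : Int) + 2) - 1

lemma bitsUpTo_length (c : Nat) : (bitsUpTo c).length = 2 ^ (c + 1) - 2 := by
  induction c with
  | zero => rfl
  | succ c ih =>
      simp [bitsUpTo, blockA, prod01_length, ih]
      have h2 : 1 ≤ 2 ^ (c + 1) := Nat.one_le_two_pow
      rw [pow_succ]
      omega

lemma bit_high (n r' : Nat) (hr : r' < 2 ^ n) : ((2 ^ n + r') >>> n) % 2 = 1 := by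
  rw [Nat.shiftRight_eq_div_pow]
  have : (2 ^ n + r') / 2 ^ n = 1 + r' / 2 ^ n := by
    rw [Nat.add_comm, Nat.add_div_right _ (Nat.pos_of_ne_zero (by positivity)), Nat.add_comm]
  rw [this, Nat.div_eq_of_lt hr]

lemma bit_low (n r' i : Nat) (hi : i < n) (_hr : r' < 2 ^ n) :
    ((2 ^ n + r') >>> i) % 2 = (r' >>> i) % 2 := by
  rw [Nat.shiftRight_eq_div_pow, Nat.shiftRight_eq_div_pow]
  have hpow : 2 ^ n = 2 ^ (n - i) * 2 ^ i := by
    rw [← pow_add]; congr 1; omega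
  have hdiv : (2 ^ n + r') / 2 ^ i = r' / 2 ^ i + 2 ^ (n - i) := by
    rw [hpow, Nat.add_comm, Nat.add_mul_div_right _ _ (Nat.pos_of_ne_zero (by positivity))]
  rw [hdiv]
  have heven : 2 ^ (n - i) = 2 * 2 ^ (n - i - 1) := by
    rw [← pow_succ']; congr 1; omega
  omega

lemma lsb_split (n r' : Nat) (hr : r' < 2 ^ n) :
    lsb (2 ^ n + r') (n + 1) = lsb r' n ++ ['1'] := by
  unfold lsb
  rw [List.range_succ, List.map_append]
  congr 1
  · exact List.map_congr_left (fun i hi =>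
      by rw [bit_low n r' i (List.mem_range.mp hi) hr])
  · simp [bit_high n r' hr]

lemma lsb_pad (n r : Nat) (hr : r < 2 ^ n) : lsb r (n + 1) = lsb r n ++ ['0'] := by
  unfold lsb
  rw [List.range_succ, List.map_append]
  have h0 : r >>> n = 0 := by
    rw [Nat.shiftRight_eq_div_pow]; exact Nat.div_eq_of_lt hr
  simp [h0]

lemma prod01_get (n : Nat) : ∀ r (h : r < (prod01 n).length), (prod01 n)[r].reverse = lsb r n := by
  induction n with
  | zero =>
      intro r h
      simp [prod01] at h
      subst h
      simp [prod01, lsb]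
  | succ n ih =>
      intro r h
      have hstep : prod01 (n + 1)
          = (prod01 n).map (fun p => '0' :: p) ++ (prod01 n).map (fun p => '1' :: p) := rfl
      have hlen : ((prod01 n).map (fun p => '0' :: p)).length = 2 ^ n := by
        simp [prod01_length]
      rw [prod01_length, pow_succ] at h
      by_cases hr : r < 2 ^ n
      · rw [List.getElem_of_eq hstep, List.getElem_append_left (by omega)]
        rw [List.getElem_map]
        have hrec := ih r (by rw [prod01_length]; omega)
        simp only [List.reverse_cons, hrec]
        exact (lsb_pad n r hr).symm
      · have hr2 : r - 2 ^ n < 2 ^ n := by omega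
        rw [List.getElem_of_eq hstep, List.getElem_append_right (by omega)]
        rw [List.getElem_map]
        simp only [List.reverse_cons, hlen]
        rw [ih (r - 2 ^ n) (by rw [prod01_length]; omega)]
        have hre : r = 2 ^ n + (r - 2 ^ n) := by omega
        conv_rhs => rw [hre]
        rw [lsb_split n (r - 2 ^ n) hr2]

lemma bitLength_pin (m : Nat) (v : Int) (h1 : (2:Int) ^ m ≤ v) (h2 : v < 2 ^ (m + 1)) :
    PySem.Int.bitLength v = m + 1 := by
  have hv0 : v ≠ 0 := by
    have : (0:Int) < 2 ^ m := by positivity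
    omega
  have hNabs : v.natAbs = v.toNat := by omega
  have h1' : 2 ^ m ≤ v.natAbs := by
    have : ((2 ^ m : Nat) : Int) ≤ v := by push_cast; exact h1
    omega
  have h2' : v.natAbs < 2 ^ (m + 1) := by
    have : v < ((2 ^ (m + 1) : Nat) : Int) := by push_cast; exact h2
    omega
  have hub := PySem.Int.lt_two_pow_bitLength v
  have hlb := PySem.Int.two_pow_bitLength_le v hv0
  set b := PySem.Int.bitLength v with hb
  have hmb : m < b := by
    by_contra hc
    have : 2 ^ b ≤ 2 ^ m := Nat.pow_le_pow_right (by norm_num) (by omega)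
    omega
  have hbm : b - 1 < m + 1 := by
    by_contra hc
    have : 2 ^ (m + 1) ≤ 2 ^ (b - 1) := Nat.pow_le_pow_right (by norm_num) (by omega)
    omega
  omega

lemma bitsUpTo_get (c : Nat) : ∀ j (h : j < (bitsUpTo c).length),
    (bitsUpTo c)[j] = String.mk (lsb (j + 2 - 2 ^ (Lf j)) (Lf j)) := by
  induction c with
  | zero => intro j h; simp [bitsUpTo] at h
  | succ c ih =>
      intro j h
      have hstep : bitsUpTo (c + 1) = bitsUpTo c ++ blockA (c + 1) := rfl
      have hlenc : (bitsUpTo c).length = 2 ^ (c + 1) - 2 := bitsUpTo_length c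
      have h21 : 2 ≤ 2 ^ (c + 1) := by
        calc 2 = 2 ^ 1 := rfl
        _ ≤ 2 ^ (c + 1) := Nat.pow_le_pow_right (by norm_num) (by omega)
      have hlen1 : (bitsUpTo (c + 1)).length = 2 ^ (c + 1) * 2 - 2 := by
        rw [bitsUpTo_length, pow_succ]
      have h' : j < 2 ^ (c + 1) * 2 - 2 := by omega
      by_cases hj : j < 2 ^ (c + 1) - 2
      · rw [List.getElem_of_eq hstep, List.getElem_append_left (by omega)]
        exact ih j (by omega)
      · -- j lies in the block of strings of length c+1
        have hr : j - (2 ^ (c + 1) - 2) < 2 ^ (c + 1) := by omega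
        set r := j - (2 ^ (c + 1) - 2) with hrdef
        have hje : j + 2 = 2 ^ (c + 1) + r := by omega
        have hLf : Lf j = c + 1 := by
          unfold Lf
          have hpin := bitLength_pin (c + 1) ((j : Int) + 2)
            (by
              have : ((2 ^ (c + 1) : Nat) : Int) ≤ (j : Int) + 2 := by omega
              exact_mod_cast this)
            (by
              have hps : 2 ^ (c + 1 + 1) = 2 ^ (c + 1) * 2 := pow_succ 2 (c + 1)
              have : (j : Int) + 2 < ((2 ^ (c + 1 + 1) : Nat) : Int) := by omega
              exact_mod_cast this)
          rw [hpin]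
          omega
        rw [List.getElem_of_eq hstep, List.getElem_append_right (by omega)]
        rw [hLf]
        have hoff : j + 2 - 2 ^ (c + 1) = r := by omega
        rw [hoff]
        unfold blockA
        rw [List.getElem_map]
        congr 1
        rw [prod01_get (c + 1) (j - (bitsUpTo c).length) (by rw [prod01_length]; omega)]
        have hidx : j - (bitsUpTo c).length = r := by omega
        rw [hidx]

lemma aLoop_spec (lookup : Int) : ∀ (N c : Nat),
    (lookup + 1 - ((bitsUpTo c).length : Int)).toNat ≤ N →
    ∃ m, aLoop lookup (bitsUpTo c) (c + 1) = bitsUpTo m ∧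
      ¬ (((bitsUpTo m).length : Int) - 1 < lookup) := by
  intro N
  induction N with
  | zero =>
      intro c hN
      rw [aLoop]
      have hguard : ¬ (((bitsUpTo c).length : Int) - 1 < lookup) := by omega
      rw [if_neg hguard]
      exact ⟨c, rfl, hguard⟩
  | succ N ih =>
      intro c hN
      rw [aLoop]
      by_cases hguard : ((bitsUpTo c).length : Int) - 1 < lookup
      · rw [if_pos hguard]
        have hstep : bitsUpTo c ++ blockA (c + 1) = bitsUpTo (c + 1) := rfl
        rw [hstep]
        apply ih
        have hlen : (bitsUpTo (c + 1)).length = (bitsUpTo c).length + 2 ^ (c + 1) := by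
          simp [bitsUpTo_length]
          rw [pow_succ]
          have : 2 ≤ 2 ^ (c + 1) := by
            calc 2 = 2 ^ 1 := rfl
            _ ≤ 2 ^ (c + 1) := Nat.pow_le_pow_right (by norm_num) (by omega)
          omega
        have hp : 1 ≤ 2 ^ (c + 1) := Nat.one_le_two_pow
        omega
      · rw [if_neg hguard]
        exact ⟨c, rfl, hguard⟩

lemma alt_eq (k : Nat) :
    num_lookup_bit_alt ((k : Int)) = String.mk (lsb (k + 2 - 2 ^ Lf k) (Lf k)) := by
  have hne : ((k : Int) + 2) ≠ 0 := by omega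
  have habs : ((k : Int) + 2).natAbs = k + 2 := by omega
  have hple : 2 ^ (Lf k) ≤ k + 2 := by
    have h := PySem.Int.two_pow_bitLength_le ((k : Int) + 2) hne
    rw [habs] at h
    exact h
  unfold num_lookup_bit_alt
  rw [if_neg (by omega : ¬((k : Int)) = -1)]
  have hLf : PySem.Int.bitLength ((k : Int) + 2) - 1 = Lf k := rfl
  simp only [hLf]
  have hc : ((2 ^ (Lf k) : Nat) : Int) = 2 ^ (Lf k) := by push_cast; ring
  have hoff : (k : Int) + 2 - 2 ^ (Lf k) = ((k + 2 - 2 ^ (Lf k) : Nat) : Int) := by omega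
  rw [hoff]
  congr 1
  unfold lsb
  apply List.map_congr_left
  intro i _
  rw [Int.shiftRight_natCast]
  rw [show (1 : Int) = ((1 : Nat) : Int) from rfl, PySem.Int.band_natCast]
  rw [Nat.and_one_is_mod]
  by_cases hb : ((k + 2 - 2 ^ (Lf k)) >>> i) % 2 = 1
  · simp [hb]
  · have h0 : (((k + 2 - 2 ^ (Lf k)) >>> i) % 2 : Nat) = 0 := by omega
    simp [h0]

-- ===== VERDICT (by name: the statement is the Claim_ definition above) =====
theorem num_lookup_bit_spec : Claim_equal_num_lookup_bit := by
  intro lookup _hdom hpre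
  unfold Spec_num_lookup_bit
  by_cases hm1 : lookup = -1
  · simp [num_lookup_bit, num_lookup_bit_alt, hm1]
  · have hk0 : 0 ≤ lookup := by
      unfold Pre_num_lookup_bit at hpre; omega
    have hk : lookup = ((lookup.toNat : Nat) : Int) := by omega
    set k := lookup.toNat with hkdef
    unfold num_lookup_bit
    rw [if_neg hm1]
    obtain ⟨m, hm, hlen⟩ := aLoop_spec lookup (lookup + 1).toNat 0
      (by simp only [bitsUpTo, List.length_nil]; omega)
    show (PySem.List.pyGet? (aLoop lookup (bitsUpTo 0) (0 + 1)) lookup).getD "" = _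
    rw [hm]
    have hklen : k < (bitsUpTo m).length := by omega
    rw [PySem.List.pyGet?_of_nonneg _ hk0, List.getElem?_eq_getElem hklen]
    simp only [Option.getD_some]
    rw [bitsUpTo_get m k hklen, hk, alt_eq k]
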